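-- pv_equiv track=rewrite | github.com/hyp3rflow/COSE215 | Assignment/decipher.py | str2pattern
-- ===== SOURCE A (Python) =====
-- def str2pattern(string):
--     result = "\\s"
--     prev = string[0]
--     cnt = 1
--     for curr in string[1:]:
--         if prev == curr:
--             cnt += 1
--         else:
--             if cnt == 1:
--                 result += f"[{prev}]"
--             else:
--                 result += f"[{prev}]{{{cnt}}}"
--             prev = curr
--             cnt = 1
--
--     if cnt == 1:
--         result += f"[{prev}]"
--     else:
--         result += f"[{prev}]{{{cnt}}}"
--
--     return result + "(?=\\s)"
-- ===== SOURCE B (Python) =====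
-- def str2pattern(string):
--     n = len(string)
--     starts = [i for i in range(n) if i == 0 or string[i] != string[i - 1]]
--     parts = [
--         f"[{string[i]}]" if j - i == 1 else f"[{string[i]}]{{{j - i}}}"
--         for i, j in zip(starts, starts[1:] + [n])
--     ]
--     return "\\s" + "".join(parts) + "(?=\\s)"
-- ===== Notes on version B (the rewrite author's own statement) =====
-- stated objective: alternative
-- what changed: Instead of A's single left-to-right state machine carrying prev/cnt and flushing on change, B first computes the list of run-start indices with a filter over all positions (i==0 or string[i]!=string[i-1]), then zips consecutive start indices (plus the length) to get each run's character and length and joins the segments once.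
import Mathlib
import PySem

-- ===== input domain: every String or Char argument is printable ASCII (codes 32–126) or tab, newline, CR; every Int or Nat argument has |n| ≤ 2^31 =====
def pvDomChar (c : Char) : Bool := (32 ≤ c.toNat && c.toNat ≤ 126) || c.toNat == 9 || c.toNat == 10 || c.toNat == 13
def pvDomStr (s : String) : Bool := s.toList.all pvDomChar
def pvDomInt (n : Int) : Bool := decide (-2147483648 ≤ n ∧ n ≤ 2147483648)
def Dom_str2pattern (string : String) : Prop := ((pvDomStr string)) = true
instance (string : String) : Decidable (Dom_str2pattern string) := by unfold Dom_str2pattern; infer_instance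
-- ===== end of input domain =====

-- B replaces A's prev/cnt state machine by a two-stage plan: a filter computing all run-start
-- indices, then a zip of consecutive starts giving each run's length (return value only; neither mutates).

-- ===== PORT A =====
def segA (prev : Char) (cnt : Int) : String :=
  if cnt == 1 then "[" ++ String.ofList [prev] ++ "]"
  else "[" ++ String.ofList [prev] ++ "]{" ++ PySem.Int.toStr cnt ++ "}"

def stepA (st : String × Char × Int) (curr : Char) : String × Char × Int :=
  if st.2.1 == curr then (st.1, st.2.1, st.2.2 + 1)
  else (st.1 ++ segA st.2.1 st.2.2, curr, 1)

def str2pattern (string : String) : String :=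
  match string.toList with
  | [] => ""   -- Python raises IndexError at string[0]; excluded by Pre_str2pattern
  | p :: tail =>
    let st := tail.foldl stepA ("\\s", p, 1)
    st.1 ++ segA st.2.1 st.2.2 ++ "(?=\\s)"

-- ===== PORT B =====
def segB (c : Char) (k : Int) : String :=
  if k == 1 then "[" ++ String.ofList [c] ++ "]"
  else "[" ++ String.ofList [c] ++ "]{" ++ PySem.Int.toStr k ++ "}"

-- the comprehension [i for i in range(n) if i == 0 or string[i] != string[i-1]]
-- (every index the filter keeps or reads is in range, so getD's default is never returned)
def startsB (cs : List Char) : List Nat :=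
  (List.range cs.length).filter (fun i => i == 0 || !(cs.getD i default == cs.getD (i - 1) default))

def str2pattern_alt (string : String) : String :=
  let cs := string.toList
  let starts := startsB cs
  let parts := (starts.zip (starts.drop 1 ++ [cs.length])).map
      (fun ij => segB (cs.getD ij.1 default) ((ij.2 : Int) - (ij.1 : Int)))
  "\\s" ++ String.join parts ++ "(?=\\s)"

-- ===== PRECONDITION & SPEC =====
-- Pre_ excludes only the empty string, on which A raises IndexError.
def Pre_str2pattern (string : String) : Prop := string ≠ ""
instance (string : String) : Decidable (Pre_str2pattern string) := by unfold Pre_str2pattern; infer_instance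
def pvWitness_str2pattern : String := "aab c"


def Spec_str2pattern (string : String) (out : String) : Prop := out = str2pattern_alt string
instance (string : String) (out : String) : Decidable (Spec_str2pattern string out) := by unfold Spec_str2pattern; infer_instance

-- ===== CLAIM (what is proved, stated in full; the proofs are below) =====
def Claim_equal_str2pattern : Prop := ∀ (string : String), Dom_str2pattern string → Pre_str2pattern string → Spec_str2pattern string (str2pattern string)

-- ===== LEMMAS AND PROOFS =====

-- run list in span form (proof-side middleman between the two ports)
def runsSpan (cs : List Char) : List (Char × Int) :=
  match cs with
  | [] => []
  | c :: rest =>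
    (c, 1 + ((rest.takeWhile (fun x => x == c)).length : Int)) ::
      runsSpan (rest.dropWhile (fun x => x == c))
termination_by cs.length
decreasing_by
  have := List.length_dropWhile_le (fun x => x == c) rest
  simp
  omega

theorem runsSpan_nil : runsSpan [] = [] := by
  rw [runsSpan.eq_def]

theorem runsSpan_cons (c : Char) (rest : List Char) :
    runsSpan (c :: rest)
      = (c, 1 + ((rest.takeWhile (fun x => x == c)).length : Int)) ::
          runsSpan (rest.dropWhile (fun x => x == c)) := by
  rw [runsSpan.eq_def]

theorem foldl_append_str (l : List String) (x : String) :
    l.foldl (fun r s => r ++ s) x = x ++ l.foldl (fun r s => r ++ s) "" := by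
  induction l generalizing x with
  | nil => simp
  | cons a l ih =>
    simp only [List.foldl]
    rw [ih (x ++ a), ih ("" ++ a)]
    simp [String.append_assoc]

theorem join_cons (a : String) (l : List String) :
    String.join (a :: l) = a ++ String.join l := by
  simp only [String.join, List.foldl]
  rw [foldl_append_str l ("" ++ a)]
  simp

-- A's fold characterised by runsFrom
def runsFrom : Char → Int → List Char → List (Char × Int)
  | prev, cnt, [] => [(prev, cnt)]
  | prev, cnt, c :: cs =>
    if prev == c then runsFrom prev (cnt + 1) cs
    else (prev, cnt) :: runsFrom c 1 cs

theorem foldA_eq (cs : List Char) (res : String) (prev : Char) (cnt : Int) :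
    (cs.foldl stepA (res, prev, cnt)).1
        ++ segA (cs.foldl stepA (res, prev, cnt)).2.1 (cs.foldl stepA (res, prev, cnt)).2.2
      = res ++ String.join ((runsFrom prev cnt cs).map (fun ck => segA ck.1 ck.2)) := by
  induction cs generalizing res prev cnt with
  | nil => simp [runsFrom, String.join]
  | cons c cs ih =>
    by_cases h : prev = c
    · simp [List.foldl, stepA, h, runsFrom, ih]
    · simp only [List.foldl, stepA, runsFrom, beq_iff_eq, h, if_false]
      rw [ih]
      simp [join_cons, String.append_assoc]

theorem runsFrom_eq_span (cs : List Char) (prev : Char) (cnt : Int) :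
    runsFrom prev cnt cs
      = (prev, cnt + ((cs.takeWhile (fun x => x == prev)).length : Int)) ::
          runsSpan (cs.dropWhile (fun x => x == prev)) := by
  induction cs generalizing prev cnt with
  | nil => simp [runsFrom, runsSpan_nil]
  | cons c cs ih =>
    by_cases h : prev = c
    · subst h
      simp [runsFrom, ih]
      ring
    · have hc : ¬ (c = prev) := fun e => h e.symm
      rw [List.takeWhile_cons, List.dropWhile_cons]
      simp only [beq_iff_eq, hc, if_false]
      rw [runsSpan_cons]
      simp [runsFrom, beq_iff_eq, h, ih]

-- B-side: index arithmetic for a leading run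
theorem getD_run (c : Char) (tk d : List Char)
    (htk : ∀ x ∈ tk, x = c) :
    ∀ i, i ≤ tk.length → (c :: (tk ++ d)).getD i default = c := by
  intro i hi
  cases i with
  | zero => rfl
  | succ i =>
    rw [List.getD_cons_succ]
    have hlt : i < tk.length := by omega
    rw [List.getD_eq_getElem _ _ (by simp; omega), List.getElem_append_left hlt]
    exact htk _ (List.getElem_mem _)

theorem getD_shift (c : Char) (tk d : List Char) (i : Nat) :
    (c :: (tk ++ d)).getD (tk.length + 1 + i) default = d.getD i default := by
  have h1 : tk.length + 1 + i = (tk.length + i) + 1 := by omega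
  rw [h1, List.getD_cons_succ]
  unfold List.getD
  rw [List.getElem?_append_right (by omega)]
  have h2 : tk.length + i - tk.length = i := by omega
  rw [h2]

theorem startsB_head0 (x : Char) (t : List Char) :
    startsB (x :: t) = 0 :: ((List.map Nat.succ (List.range t.length)).filter
      (fun i => i == 0 || !((x :: t).getD i default == (x :: t).getD (i - 1) default))) := by
  unfold startsB
  rw [show (x :: t).length = t.length + 1 from rfl, List.range_succ_eq_map]
  rw [List.filter_cons_of_pos (by simp)]

theorem dropWhile_head_false {α : Type} (q : α → Bool) (l : List α) (x : α) (t : List α)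
    (h : l.dropWhile q = x :: t) : q x = false := by
  induction l with
  | nil => simp [List.dropWhile] at h
  | cons a l ih =>
    rw [List.dropWhile_cons] at h
    by_cases ha : q a
    · rw [if_pos ha] at h; exact ih h
    · rw [if_neg ha] at h
      cases h
      exact Bool.eq_false_iff.mpr ha

-- the start-index filter of a string with a leading run of c: index 0, then the tail's starts shifted
theorem startsB_run (c : Char) (tk d : List Char) (htk : ∀ x ∈ tk, x = c)
    (hd : ∀ x t, d = x :: t → (x == c) = false) :
    startsB (c :: (tk ++ d)) = 0 :: (startsB d).map (fun i => (1 + tk.length) + i) := by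
  unfold startsB
  have hlen : (c :: (tk ++ d)).length = (1 + tk.length) + d.length := by simp; omega
  rw [hlen, List.range_add, List.filter_append]
  have hA : (List.range (1 + tk.length)).filter
      (fun i => i == 0 || !((c :: (tk ++ d)).getD i default == (c :: (tk ++ d)).getD (i - 1) default)) = [0] := by
    rw [List.range_add, List.filter_append, List.filter_map]
    have hz : (List.range 1).filter (fun i => i == 0 || !((c :: (tk ++ d)).getD i default == (c :: (tk ++ d)).getD (i - 1) default)) = [0] := by
      simp [List.range_succ]
    have hnil : (List.range tk.length).filter
        ((fun i => i == 0 || !((c :: (tk ++ d)).getD i default == (c :: (tk ++ d)).getD (i - 1) default)) ∘ (fun x => 1 + x)) = [] := by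
      rw [List.filter_eq_nil_iff]
      intro i hi
      have hilt : i < tk.length := List.mem_range.mp hi
      have e1 : (c :: (tk ++ d)).getD (1 + i) default = c := getD_run c tk d htk (1 + i) (by omega)
      have e2 : (c :: (tk ++ d)).getD (1 + i - 1) default = c := getD_run c tk d htk (1 + i - 1) (by omega)
      simp only [Function.comp, e1, e2, beq_self_eq_true, Bool.not_true, Bool.or_false,
        beq_iff_eq]
      omega
    rw [hz, hnil]
    simp
  have hB : (List.map (fun x => 1 + tk.length + x) (List.range d.length)).filter
      (fun i => i == 0 || !((c :: (tk ++ d)).getD i default == (c :: (tk ++ d)).getD (i - 1) default))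
      = List.map (fun i => (1 + tk.length) + i)
          ((List.range d.length).filter (fun i => i == 0 || !(d.getD i default == d.getD (i - 1) default))) := by
    rw [List.filter_map]
    congr 1
    apply List.filter_congr
    intro i hi
    have hilt : i < d.length := List.mem_range.mp hi
    have hhead : (d.getD 0 default == c) = false := by
      cases d with
      | nil => simp at hilt
      | cons x t => simpa using hd x t rfl
    cases i with
    | zero =>
      have e1 : (c :: (tk ++ d)).getD (1 + tk.length + 0) default = d.getD 0 default := by
        have h : 1 + tk.length + 0 = tk.length + 1 + 0 := by omega
        rw [h, getD_shift]
      have e2 : (c :: (tk ++ d)).getD (1 + tk.length + 0 - 1) default = c :=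
        getD_run c tk d htk _ (by omega)
      simp only [Function.comp, e1, e2]
      simp
      simpa [List.getD] using hhead
    | succ i =>
      have e1 : (c :: (tk ++ d)).getD (1 + tk.length + (i + 1)) default = d.getD (i + 1) default := by
        have h : 1 + tk.length + (i + 1) = tk.length + 1 + (i + 1) := by omega
        rw [h, getD_shift]
      have e2 : (c :: (tk ++ d)).getD (1 + tk.length + (i + 1) - 1) default = d.getD i default := by
        have h : 1 + tk.length + (i + 1) - 1 = tk.length + 1 + i := by omega
        rw [h, getD_shift]
      simp only [Function.comp, e1, e2]
      simp
  rw [hA, hB]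
  rfl

-- one unfolding step of B's zip-of-starts, given the leading run explicitly
theorem partsB_run (c : Char) (tk d : List Char)
    (htk : ∀ x ∈ tk, x = c)
    (hd : ∀ x t, d = x :: t → (x == c) = false)
    (IH : ((startsB d).zip ((startsB d).drop 1 ++ [d.length])).map
        (fun ij => segB (d.getD ij.1 default) ((ij.2 : Int) - (ij.1 : Int)))
      = (runsSpan d).map (fun ck => segB ck.1 ck.2)) :
    ((startsB (c :: (tk ++ d))).zip ((startsB (c :: (tk ++ d))).drop 1 ++ [(c :: (tk ++ d)).length])).map
        (fun ij => segB ((c :: (tk ++ d)).getD ij.1 default) ((ij.2 : Int) - (ij.1 : Int)))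
      = segB c (1 + (tk.length : Int)) :: (runsSpan d).map (fun ck => segB ck.1 ck.2) := by
  rw [startsB_run c tk d htk hd]
  have hn : (c :: (tk ++ d)).length = (1 + tk.length) + d.length := by simp; omega
  rw [hn]
  cases d with
  | nil =>
    rw [runsSpan_nil]
    have h0 : startsB ([] : List Char) = [] := rfl
    rw [h0]
    simp only [List.map_nil, List.length_nil, Nat.add_zero, List.drop_one, List.tail_cons,
      List.nil_append, List.zip_cons_cons, List.zip_nil_left, List.map_cons, Nat.cast_zero]
    simp only [List.getD_cons_zero]
    congr 2
    try push_cast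
    try ring
  | cons x t =>
    rw [← IH]
    obtain ⟨T, hT⟩ : ∃ T, startsB (x :: t) = 0 :: T := ⟨_, startsB_head0 x t⟩
    rw [hT]
    simp only [List.map_cons, List.drop_one, List.tail_cons]
    rw [List.cons_append, List.zip_cons_cons, List.map_cons]
    congr 1
    have hright : List.map (fun i => 1 + tk.length + i) T ++ [1 + tk.length + (x :: t).length]
        = List.map (fun i => 1 + tk.length + i) (T ++ [(x :: t).length]) := by
      simp
    have hleft : (1 + tk.length + 0) :: List.map (fun i => 1 + tk.length + i) T
        = List.map (fun i => 1 + tk.length + i) (0 :: T) := rfl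
    rw [hright, hleft, List.zip_map, List.map_map]
    apply List.map_congr_left
    intro ij _
    obtain ⟨i, j⟩ := ij
    simp only [Prod.map, Function.comp]
    congr 1
    · have e : 1 + tk.length + i = tk.length + 1 + i := by omega
      rw [e, getD_shift]
    · push_cast
      ring

-- B's parts equal the span runs, segment by segment
theorem partsB_eq (cs : List Char) :
    ((startsB cs).zip ((startsB cs).drop 1 ++ [cs.length])).map
        (fun ij => segB (cs.getD ij.1 default) ((ij.2 : Int) - (ij.1 : Int)))
      = (runsSpan cs).map (fun ck => segB ck.1 ck.2) := by
  match cs with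
  | [] => rw [runsSpan_nil]; rfl
  | c :: rest =>
    have hsplit : rest.takeWhile (fun x => x == c) ++ rest.dropWhile (fun x => x == c) = rest :=
      List.takeWhile_append_dropWhile
    have htk : ∀ x ∈ rest.takeWhile (fun x => x == c), x = c := fun x hx => by
      simpa using List.mem_takeWhile_imp hx
    have hdh : ∀ x t, rest.dropWhile (fun x => x == c) = x :: t → (x == c) = false :=
      fun x t h => dropWhile_head_false _ rest x t h
    have IH := partsB_eq (rest.dropWhile (fun x => x == c))
    have key := partsB_run c (rest.takeWhile (fun x => x == c)) (rest.dropWhile (fun x => x == c)) htk hdh IH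
    rw [hsplit] at key
    rw [key, runsSpan_cons, List.map_cons]
termination_by cs.length
decreasing_by
  have := List.length_dropWhile_le (fun x => x == c) rest
  simp
  omega

-- ===== VERDICT (by name: the statement is the Claim_ definition above) =====
theorem str2pattern_spec : Claim_equal_str2pattern := by
  intro s _ hpre
  unfold Spec_str2pattern str2pattern str2pattern_alt
  have hne : s.toList ≠ [] := fun h => hpre (String.toList_eq_nil_iff.mp h)
  cases hL : s.toList with
  | nil => exact absurd hL hne
  | cons p tail =>
    show (tail.foldl stepA ("\\s", p, 1)).1
          ++ segA (tail.foldl stepA ("\\s", p, 1)).2.1 (tail.foldl stepA ("\\s", p, 1)).2.2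
          ++ "(?=\\s)"
        = "\\s" ++ String.join (((startsB (p :: tail)).zip ((startsB (p :: tail)).drop 1 ++ [(p :: tail).length])).map
            (fun ij => segB ((p :: tail).getD ij.1 default) ((ij.2 : Int) - (ij.1 : Int)))) ++ "(?=\\s)"
    rw [foldA_eq, partsB_eq, runsSpan_cons, runsFrom_eq_span]
    rfl
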